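-- pv_equiv track=rewrite | github.com/cmpute/pcl.py | pcl/io/file_io.py | __parse_descr
-- ===== SOURCE A (Python) =====
-- def __parse_descr(descr):
--     # parse description string into (size, type, count)
--     digipre = list()
--     digisuf = list()
--     pre = True
--     for chara in descr:
--         if str.isdigit(chara):
--             if pre:
--                 digipre.append(chara)
--             else:
--                 digisuf.append(chara)
--         else:
--             dtype = chara.upper()
--             pre = False
--     if len(digipre) == 0:
--         return ''.join(digisuf), dtype, '1'
--     else:
--         return ''.join(digisuf), dtype, ''.join(digipre)
-- ===== SOURCE B (Python) =====
-- def __parse_descr(descr):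
--     # B: slice-based decomposition — split off the leading digit prefix, then
--     # derive the fields from the remainder by filtering (vs A's one-pass flag machine).
--     i = 0
--     while i < len(descr) and descr[i].isdigit():
--         i += 1
--     rest = descr[i:]
--     dtype = [c for c in rest if not c.isdigit()][-1].upper()
--     digisuf = ''.join(c for c in rest if c.isdigit())
--     return digisuf, dtype, (descr[:i] or '1')
-- ===== Notes on version B (the rewrite author's own statement) =====
-- stated objective: simpler
-- what changed: Replaced A's single-pass state machine (pre flag, two accumulator lists, last-assignment dtype) by a slice-based decomposition: find the maximal leading digit prefix, take the rest as a slice, and derive digisuf/dtype by filtering the rest.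
import Mathlib
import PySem

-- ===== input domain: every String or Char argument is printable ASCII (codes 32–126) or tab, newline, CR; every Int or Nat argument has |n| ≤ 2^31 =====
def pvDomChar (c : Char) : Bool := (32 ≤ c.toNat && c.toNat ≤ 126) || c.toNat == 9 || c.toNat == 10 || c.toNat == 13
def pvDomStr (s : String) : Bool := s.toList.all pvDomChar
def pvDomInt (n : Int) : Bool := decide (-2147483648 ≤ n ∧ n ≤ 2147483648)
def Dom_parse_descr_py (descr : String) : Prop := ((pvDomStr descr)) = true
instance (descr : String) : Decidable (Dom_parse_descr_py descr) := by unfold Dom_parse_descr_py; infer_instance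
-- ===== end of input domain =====

-- B replaces A's one-pass flag state machine by a slice-based decomposition
-- (split off the leading digit prefix, then filter the remainder); objective: simpler.


-- ===== PORT A =====
-- fold state = (digipre, digisuf, pre, dtype); dtype starts unbound (none).
def parse_descr_py (descr : String) : String × String × String :=
  let st := descr.toList.foldl
    (fun (s : List Char × List Char × Bool × Option Char) c =>
      if PySem.Chars.isdigit c then
        if s.2.2.1 then (s.1 ++ [c], s.2.1, s.2.2.1, s.2.2.2)
        else (s.1, s.2.1 ++ [c], s.2.2.1, s.2.2.2)
      else (s.1, s.2.1, false, some (PySem.Chars.upperChar c)))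
    ([], [], true, none)
  -- dtype is unbound in Python when no non-digit occurred (UnboundLocalError); Pre_ excludes that, ' ' is a dummy
  let dtype := String.ofList [st.2.2.2.getD ' ']
  if st.1.length = 0 then (String.ofList st.2.1, dtype, "1")
  else (String.ofList st.2.1, dtype, String.ofList st.1)

-- ===== PORT B =====
def parse_descr_py_alt (descr : String) : String × String × String :=
  let l := descr.toList
  let pre := l.takeWhile PySem.Chars.isdigit        -- descr[:i], the maximal digit prefix
  let rest := l.drop pre.length                      -- descr[i:]
  let nd := rest.filter (fun c => !(PySem.Chars.isdigit c))
  -- nd[-1]; on Pre_ nd is nonempty, ' ' is a dummy (Python raises IndexError there)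
  let dtype := String.ofList [PySem.Chars.upperChar ((PySem.List.pyGet? nd (-1)).getD ' ')]
  let digisuf := String.ofList (rest.filter (fun c => PySem.Chars.isdigit c))
  (digisuf, dtype, if pre = [] then "1" else String.ofList pre)

-- ===== PRECONDITION & SPEC =====
-- Pre_ excludes exactly the inputs on which A raises UnboundLocalError:
-- strings with no non-digit character (`dtype` never assigned), including the empty string.
def Pre_parse_descr_py (descr : String) : Prop :=
  descr.toList.any (fun c => !(PySem.Chars.isdigit c)) = true
instance (descr : String) : Decidable (Pre_parse_descr_py descr) := by unfold Pre_parse_descr_py; infer_instance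
def pvWitness_parse_descr_py : String := "2F16"

def Spec_parse_descr_py (descr : String) (out : String × String × String) : Prop := out = parse_descr_py_alt descr
instance (descr : String) (out : String × String × String) : Decidable (Spec_parse_descr_py descr out) := by unfold Spec_parse_descr_py; infer_instance

-- ===== CLAIM (what is proved, stated in full; the proofs are below) =====
def Claim_equal_parse_descr_py : Prop := ∀ (descr : String), Dom_parse_descr_py descr → Pre_parse_descr_py descr → Spec_parse_descr_py descr (parse_descr_py descr)

-- ===== LEMMAS AND PROOFS =====

theorem pvDropTake (l : List Char) (p : Char → Bool) :
    l.drop (l.takeWhile p).length = l.dropWhile p := by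
  induction l with
  | nil => simp
  | cons c t ih => by_cases h : p c <;> simp [h, ih]

-- getLast? of a cons, expressed as an Or with the head as fallback
theorem pvLast_cons {α β : Type} (f : α → β) (c : α) (xs : List α) :
    ((c :: xs).getLast?).map f = Option.or ((xs.getLast?).map f) (some (f c)) := by
  cases xs with
  | nil => simp
  | cons y ys =>
    rw [List.getLast?_cons_cons]
    cases h : (y :: ys).getLast? with
    | none => simp [List.getLast?_eq_none_iff] at h
    | some v => simp

-- A's fold from the post-prefix state
theorem pvFoldA_false (l : List Char) (dp ds : List Char) (dt : Option Char) :
    l.foldl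
      (fun (s : List Char × List Char × Bool × Option Char) c =>
        if PySem.Chars.isdigit c then
          if s.2.2.1 then (s.1 ++ [c], s.2.1, s.2.2.1, s.2.2.2)
          else (s.1, s.2.1 ++ [c], s.2.2.1, s.2.2.2)
        else (s.1, s.2.1, false, some (PySem.Chars.upperChar c)))
      (dp, ds, false, dt)
    = (dp, ds ++ l.filter (fun c => PySem.Chars.isdigit c), false,
        Option.or (((l.filter (fun c => !(PySem.Chars.isdigit c))).getLast?).map PySem.Chars.upperChar) dt) := by
  induction l generalizing ds dt with
  | nil => simp
  | cons c t ih =>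
    by_cases h : PySem.Chars.isdigit c
    · simp [h, ih]
    · simp [h, ih, pvLast_cons]

-- A's fold from the initial state
theorem pvFoldA_true (l : List Char) (dp : List Char) :
    l.foldl
      (fun (s : List Char × List Char × Bool × Option Char) c =>
        if PySem.Chars.isdigit c then
          if s.2.2.1 then (s.1 ++ [c], s.2.1, s.2.2.1, s.2.2.2)
          else (s.1, s.2.1 ++ [c], s.2.2.1, s.2.2.2)
        else (s.1, s.2.1, false, some (PySem.Chars.upperChar c)))
      (dp, [], true, none)
    = (dp ++ l.takeWhile (fun c => PySem.Chars.isdigit c),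
       (l.dropWhile (fun c => PySem.Chars.isdigit c)).filter (fun c => PySem.Chars.isdigit c),
       l.all (fun c => PySem.Chars.isdigit c),
       (((l.dropWhile (fun c => PySem.Chars.isdigit c)).filter (fun c => !(PySem.Chars.isdigit c))).getLast?).map PySem.Chars.upperChar) := by
  induction l generalizing dp with
  | nil => simp
  | cons c t ih =>
    by_cases h : PySem.Chars.isdigit c
    · simp [h, ih]
    · simp [h, pvFoldA_false, pvLast_cons]

-- ===== VERDICT (by name: the statement is the Claim_ definition above) =====
theorem parse_descr_py_spec : Claim_equal_parse_descr_py := by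
  intro descr _ hpre
  have hnd : (descr.toList.dropWhile (fun c => PySem.Chars.isdigit c)).filter
      (fun c => !(PySem.Chars.isdigit c)) ≠ [] := by
    unfold Pre_parse_descr_py at hpre
    simp only [List.any_eq_true] at hpre
    obtain ⟨c, hc, hcd⟩ := hpre
    rw [← List.takeWhile_append_dropWhile (p := fun c => PySem.Chars.isdigit c) (l := descr.toList)] at hc
    rcases List.mem_append.mp hc with h | h
    · have := List.mem_takeWhile_imp h
      simp_all
    · intro hemp
      have : c ∈ (descr.toList.dropWhile (fun c => PySem.Chars.isdigit c)).filter
          (fun c => !(PySem.Chars.isdigit c)) := List.mem_filter.mpr ⟨h, hcd⟩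
      simp [hemp] at this
  obtain ⟨v, hv⟩ := Option.ne_none_iff_exists'.mp (fun h => hnd (List.getLast?_eq_none_iff.mp h))
  unfold Spec_parse_descr_py parse_descr_py parse_descr_py_alt
  rw [pvFoldA_true]
  simp only [pvDropTake, hv, PySem.List.pyGet?_neg_one, Option.map_some, Option.getD_some,
    List.nil_append]
  rcases eq_or_ne (descr.toList.takeWhile (fun c => PySem.Chars.isdigit c)) [] with he | he <;>
    simp [he, List.length_eq_zero_iff]
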